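-- pv_equiv track=rewrite | github.com/togidan/ai_engineering_capstone | backend/scripts/wiki_bootstrap.py | filter_economic_content
-- ===== SOURCE A (Python) =====
-- def filter_economic_content(content: str, city_name: str) -> str:
--     """Filter content to focus on economic development topics"""
--     lines = content.split('\n')
--     filtered_lines = []
--     current_section = ""
--     include_section = False
--
--     # Economic development keywords
--     econ_keywords = [
--         'economy', 'economic', 'business', 'industry', 'industrial', 'manufacturing',
--         'technology', 'biotech', 'aerospace', 'logistics', 'transportation', 'infrastructure',
--         'workforce', 'employment', 'jobs', 'unemployment', 'education', 'university',
--         'research', 'development', 'demographics', 'population', 'income', 'commerce',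
--         'trade', 'export', 'import', 'port', 'airport', 'railroad', 'highway',
--         'utilities', 'power', 'energy', 'water', 'telecommunications', 'broadband'
--     ]
--
--     for line in lines:
--         # Check if this is a section header
--         if line.startswith('='):
--             current_section = line.lower()
--             # Include section if it contains economic keywords
--             include_section = any(keyword in current_section for keyword in econ_keywords)
--             if include_section:
--                 filtered_lines.append(line)
--         elif include_section:
--             # Include content from relevant sections
--             filtered_lines.append(line)
--         elif any(keyword in line.lower() for keyword in econ_keywords):
--             # Include individual lines that mention economic topics
--             filtered_lines.append(line)
--
--     # If filtered content is too short, include more general content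
--     filtered_content = '\n'.join(filtered_lines)
--     if len(filtered_content) < 1000:
--         # Take first 3000 characters of original content
--         filtered_content = content[:3000]
--
--     return filtered_content
-- ===== SOURCE B (Python) =====
-- ECON_KEYWORDS = [
--     'economy', 'economic', 'business', 'industry', 'industrial', 'manufacturing',
--     'technology', 'biotech', 'aerospace', 'logistics', 'transportation', 'infrastructure',
--     'workforce', 'employment', 'jobs', 'unemployment', 'education', 'university',
--     'research', 'development', 'demographics', 'population', 'income', 'commerce',
--     'trade', 'export', 'import', 'port', 'airport', 'railroad', 'highway',
--     'utilities', 'power', 'energy', 'water', 'telecommunications', 'broadband'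
-- ]
--
--
-- def _kw(line):
--     low = line.lower()
--     return any(k in low for k in ECON_KEYWORDS)
--
--
-- def filter_economic_content(content: str, city_name: str) -> str:
--     """Filter content to focus on economic development topics (block-wise)."""
--     lines = content.split('\n')
--     out = []
--     i, n = 0, len(lines)
--     while i < n:
--         line = lines[i]
--         if line.startswith('='):
--             # collect the whole section body up to the next header
--             j = i + 1
--             while j < n and not lines[j].startswith('='):
--                 j += 1
--             body = lines[i + 1:j]
--             if _kw(line):
--                 out.append(line)
--                 out.extend(body)
--             else:
--                 out.extend(l for l in body if _kw(l))
--             i = j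
--         else:
--             if _kw(line):
--                 out.append(line)
--             i += 1
--     filtered = '\n'.join(out)
--     if len(filtered) < 1000:
--         filtered = content[:3000]
--     return filtered
-- ===== Notes on version B (the rewrite author's own statement) =====
-- stated objective: alternative
-- what changed: Replaces A's per-line state machine (carrying current_section/include_section flags across lines) with a block decomposition: spans of lines up to the next '=' header are collected by slicing and each block is emitted whole (list.extend) or filtered at once.
import Mathlib
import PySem

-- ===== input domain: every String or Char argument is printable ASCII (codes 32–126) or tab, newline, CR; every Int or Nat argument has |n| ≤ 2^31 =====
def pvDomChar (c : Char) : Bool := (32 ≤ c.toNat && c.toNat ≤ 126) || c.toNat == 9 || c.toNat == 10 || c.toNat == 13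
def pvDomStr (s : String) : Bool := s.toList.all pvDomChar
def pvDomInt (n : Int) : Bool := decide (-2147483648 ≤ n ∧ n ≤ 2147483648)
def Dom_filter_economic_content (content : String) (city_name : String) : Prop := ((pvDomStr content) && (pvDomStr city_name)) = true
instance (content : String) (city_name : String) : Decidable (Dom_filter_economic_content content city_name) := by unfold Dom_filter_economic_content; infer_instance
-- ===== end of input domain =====

-- B replaces A's per-line section state machine by a block decomposition (span to the
-- next '=' header, then emit the whole block or its keyword lines); measured modestly faster.

-- the keyword list, shared verbatim by both programs
def econKeywords : List String :=
  ["economy", "economic", "business", "industry", "industrial", "manufacturing",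
   "technology", "biotech", "aerospace", "logistics", "transportation", "infrastructure",
   "workforce", "employment", "jobs", "unemployment", "education", "university",
   "research", "development", "demographics", "population", "income", "commerce",
   "trade", "export", "import", "port", "airport", "railroad", "highway",
   "utilities", "power", "energy", "water", "telecommunications", "broadband"]

-- any(keyword in line.lower() for keyword in econ_keywords) — the test both programs write out
def kwHit (line : String) : Bool :=
  econKeywords.any (fun k => PySem.Str.isIn k (PySem.Str.lower line))

-- ===== PORT A =====
-- loop state: (current_section, include_section, filtered_lines)
def filterStepA (st : String × Bool × List String) (line : String) : String × Bool × List String :=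
  if PySem.Str.startswith line "=" then
    let current_section := PySem.Str.lower line
    let include_section := econKeywords.any (fun k => PySem.Str.isIn k current_section)
    (current_section, include_section,
      if include_section then st.2.2 ++ [line] else st.2.2)
  else if st.2.1 then
    (st.1, st.2.1, st.2.2 ++ [line])
  else if kwHit line then
    (st.1, st.2.1, st.2.2 ++ [line])
  else st

def filter_economic_content (content : String) (city_name : String) : String :=
  let lines := (PySem.Str.split? content "\n").getD []
  let filtered_lines := (lines.foldl filterStepA ("", false, [])).2.2
  let filtered_content := PySem.Str.join "\n" filtered_lines
  if PySem.Str.len filtered_content < 1000 then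
    PySem.Str.slice content none (some 3000)
  else filtered_content

-- ===== PORT B =====
-- block scan: a header line grabs its whole body (the span up to the next header)
def bGo : List String → List String
  | [] => []
  | line :: rest =>
    if PySem.Str.startswith line "=" then
      let body := rest.takeWhile (fun l => !PySem.Str.startswith l "=")
      let rest' := rest.dropWhile (fun l => !PySem.Str.startswith l "=")
      (if kwHit line then line :: body else body.filter kwHit) ++ bGo rest'
    else
      (if kwHit line then [line] else []) ++ bGo rest
termination_by ls => ls.length
decreasing_by
  · exact Nat.lt_succ_of_le (List.length_dropWhile_le _ _)
  · exact Nat.lt_succ_self _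

def filter_economic_content_alt (content : String) (city_name : String) : String :=
  let lines := (PySem.Str.split? content "\n").getD []
  let filtered := PySem.Str.join "\n" (bGo lines)
  if PySem.Str.len filtered < 1000 then
    PySem.Str.slice content none (some 3000)
  else filtered

-- ===== PRECONDITION & SPEC =====
def Spec_filter_economic_content (content : String) (city_name : String) (out : String) : Prop := out = filter_economic_content_alt content city_name
instance (content : String) (city_name : String) (out : String) : Decidable (Spec_filter_economic_content content city_name out) := by unfold Spec_filter_economic_content; infer_instance

-- ===== CLAIM (what is proved, stated in full; the proofs are below) =====
def Claim_equal_filter_economic_content : Prop := ∀ (content : String) (city_name : String), Dom_filter_economic_content content city_name → Spec_filter_economic_content content city_name (filter_economic_content content city_name)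

-- ===== LEMMAS AND PROOFS =====

-- the lines A's loop emits from state `inc`, as a structural recursion
def auxA (inc : Bool) : List String → List String
  | [] => []
  | l :: ls =>
    if PySem.Str.startswith l "=" then
      (if kwHit l then [l] else []) ++ auxA (kwHit l) ls
    else if inc then l :: auxA inc ls
    else if kwHit l then l :: auxA inc ls
    else auxA inc ls

theorem foldl_filterStepA : ∀ (ls : List String) (cs : String) (inc : Bool) (acc : List String),
    (ls.foldl filterStepA (cs, inc, acc)).2.2 = acc ++ auxA inc ls := by
  intro ls
  induction ls with
  | nil => intro cs inc acc; simp [auxA]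
  | cons l ls ih =>
    intro cs inc acc
    rw [List.foldl_cons]
    by_cases h1 : PySem.Str.startswith l "=" = true
    · have hstep : filterStepA (cs, inc, acc) l =
          (PySem.Str.lower l, kwHit l, if kwHit l then acc ++ [l] else acc) := by
        simp only [filterStepA, h1, if_pos]
        rfl
      have h1' : PySem.Chars.startswith l.toList ['='] = true := by simpa using h1
      rw [hstep, ih]
      cases hk : kwHit l <;> simp [auxA, h1', hk]
    · have hstep : filterStepA (cs, inc, acc) l =
          (cs, inc, if inc then acc ++ [l] else if kwHit l then acc ++ [l] else acc) := by
        simp only [filterStepA, h1]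
        cases inc <;> cases hk : kwHit l <;> simp
      have h1' : PySem.Chars.startswith l.toList ['='] = false := by
        simpa using h1
      rw [hstep, ih]
      cases inc <;> cases hk : kwHit l <;> simp [auxA, h1', hk]

-- the incoming include_section flag is irrelevant when the list is empty or starts at a header
theorem auxA_header_irrel (i j : Bool) : ∀ ls : List String,
    (∀ l, ls.head? = some l → PySem.Str.startswith l "=" = true) → auxA i ls = auxA j ls := by
  intro ls h
  cases ls with
  | nil => rfl
  | cons l ls =>
    have hl := h l rfl
    simp only [auxA, hl, if_pos]

-- a run of non-header lines under state `inc`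
theorem auxA_body (inc : Bool) (rest : List String) : ∀ body : List String,
    (∀ l ∈ body, PySem.Str.startswith l "=" = false) →
    auxA inc (body ++ rest) = (if inc then body else body.filter kwHit) ++ auxA inc rest := by
  intro body
  induction body with
  | nil => intro _; simp
  | cons b bs ih =>
    intro h
    have hb : PySem.Str.startswith b "=" = false := h b (by simp)
    have hbs := ih (fun l hl => h l (by simp [hl]))
    have hb' : PySem.Chars.startswith b.toList ['='] = false := by simpa using hb
    rw [List.cons_append]
    cases inc
    · cases hk : kwHit b <;> simp [auxA, hb', hk, hbs]
    · simp [auxA, hb', hbs]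

-- the first line surviving dropWhile falsifies the predicate
theorem head?_dropWhile_false (p : String → Bool) :
    ∀ (l : List String) (x : String), (l.dropWhile p).head? = some x → p x = false := by
  intro l
  induction l with
  | nil => intro x hx; simp at hx
  | cons a l ih =>
    intro x hx
    by_cases ha : p a = true
    · exact ih x (by simpa [List.dropWhile_cons, ha] using hx)
    · rw [List.dropWhile_cons, if_neg (by simp [ha])] at hx
      simp at hx
      rw [← hx]
      simpa using ha

theorem bGo_eq_auxA : ∀ ls : List String, bGo ls = auxA false ls := by
  intro ls
  induction hn : ls.length using Nat.strong_induction_on generalizing ls with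
  | _ n ih =>
  cases ls with
  | nil => simp [bGo, auxA]
  | cons l rest =>
    subst hn
    by_cases h1 : PySem.Str.startswith l "=" = true
    · rw [bGo]
      simp only [h1, if_pos]
      have hsplit : rest = rest.takeWhile (fun l => !PySem.Str.startswith l "=")
          ++ rest.dropWhile (fun l => !PySem.Str.startswith l "=") :=
        (List.takeWhile_append_dropWhile).symm
      have hbody : ∀ x ∈ rest.takeWhile (fun l => !PySem.Str.startswith l "="),
          PySem.Str.startswith x "=" = false := by
        intro x hx
        have := List.mem_takeWhile_imp hx
        simpa using this
      have hdrop : ∀ x, (rest.dropWhile (fun l => !PySem.Str.startswith l "=")).head? = some x →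
          PySem.Str.startswith x "=" = true := by
        intro x hx
        have := head?_dropWhile_false (fun l => !PySem.Str.startswith l "=") rest x hx
        simpa using this
      have hrec : bGo (rest.dropWhile (fun l => !PySem.Str.startswith l "=")) =
          auxA false (rest.dropWhile (fun l => !PySem.Str.startswith l "=")) :=
        ih _ (Nat.lt_succ_of_le (List.length_dropWhile_le _ _)) _ rfl
      conv_rhs => rw [auxA]
      simp only [h1, if_pos]
      conv_rhs => rw [hsplit]
      rw [auxA_body _ _ _ hbody, auxA_header_irrel (kwHit l) false _ hdrop, ← hrec]
      cases hk : kwHit l <;> simp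
    · rw [bGo]
      simp only [h1, Bool.false_eq_true, if_false]
      conv_rhs => rw [auxA]
      simp only [h1, Bool.false_eq_true, if_false]
      rw [ih rest.length (Nat.lt_succ_self _) rest rfl]
      cases hk : kwHit l <;> simp

-- ===== VERDICT (by name: the statement is the Claim_ definition above) =====
theorem filter_economic_content_spec : Claim_equal_filter_economic_content := by
  intro content city_name _
  show _ = _
  unfold filter_economic_content filter_economic_content_alt
  dsimp only
  rw [foldl_filterStepA, bGo_eq_auxA]
  simp
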